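-- pv_equiv track=rewrite | github.com/bailangguihun/EMMA-Q-Back | MASEval/MASEval/music_eval_v4_single_cached_fixed_v2.py | infer_triad
-- ===== SOURCE A (Python) =====
-- from typing import Any, Dict, List, Optional, Tuple
--
-- NOTE_NAMES = ["C", "C#", "D", "D#", "E", "F", "F#", "G", "G#", "A", "A#", "B"]
--
-- def infer_triad(pitch_classes: List[int]) -> Optional[str]:
--     pcs = set(pitch_classes)
--     if not pcs:
--         return None
--     best: Optional[Tuple[int, str]] = None
--     best_score = 0
--     for root in range(12):
--         maj = {root, (root + 4) % 12, (root + 7) % 12}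
--         minr = {root, (root + 3) % 12, (root + 7) % 12}
--         maj_score = len(pcs & maj)
--         min_score = len(pcs & minr)
--         if maj_score > best_score and maj_score >= 2:
--             best_score = maj_score
--             best = (root, "maj")
--         if min_score > best_score and min_score >= 2:
--             best_score = min_score
--             best = (root, "min")
--     if not best:
--         return None
--     root, q = best
--     return f"{NOTE_NAMES[root]}:{q}"
-- ===== SOURCE B (Python) =====
-- NOTE_NAMES = ["C", "C#", "D", "D#", "E", "F", "F#", "G", "G#", "A", "A#", "B"]
--
-- def infer_triad(pitch_classes):
--     # Scatter pass: each in-range pitch class credits every triad it belongs to,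
--     # then one ordered scan over the 24 score slots picks the winner.
--     maj = [0] * 12
--     mnr = [0] * 12
--     for pc in set(pitch_classes):
--         if 0 <= pc < 12:
--             maj[pc] += 1              # pc as the root
--             mnr[pc] += 1
--             maj[(pc - 4) % 12] += 1   # pc as the major third
--             mnr[(pc - 3) % 12] += 1   # pc as the minor third
--             maj[(pc - 7) % 12] += 1   # pc as the fifth
--             mnr[(pc - 7) % 12] += 1
--     best = None
--     best_score = 0
--     for root in range(12):
--         if maj[root] > best_score and maj[root] >= 2:
--             best_score = maj[root]
--             best = (root, "maj")
--         if mnr[root] > best_score and mnr[root] >= 2: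
--             best_score = mnr[root]
--             best = (root, "min")
--     if best is None:
--         return None
--     root, q = best
--     return f"{NOTE_NAMES[root]}:{q}"
-- ===== Notes on version B (the rewrite author's own statement) =====
-- stated objective: alternative
-- what changed: Instead of building two 3-element candidate sets per root and intersecting them with the pitch-class set for all 12 roots, B makes one scatter pass over the distinct in-range pitch classes, crediting each to the six triads it belongs to in a 2x12 score table, then picks the winner in one ordered scan with the same strict-> selection.
import Mathlib
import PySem

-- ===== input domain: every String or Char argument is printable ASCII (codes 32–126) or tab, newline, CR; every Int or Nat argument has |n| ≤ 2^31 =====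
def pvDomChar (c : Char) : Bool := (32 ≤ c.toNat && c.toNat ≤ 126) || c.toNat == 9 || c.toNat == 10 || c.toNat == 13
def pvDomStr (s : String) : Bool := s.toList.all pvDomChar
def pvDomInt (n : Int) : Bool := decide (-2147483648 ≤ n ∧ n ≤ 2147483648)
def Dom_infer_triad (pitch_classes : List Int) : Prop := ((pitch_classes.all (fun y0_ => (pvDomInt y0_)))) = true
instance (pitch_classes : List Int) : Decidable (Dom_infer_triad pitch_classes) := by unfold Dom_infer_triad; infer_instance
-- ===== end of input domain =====

-- B replaces A's per-root set intersections by one scatter pass that credits each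
-- in-range pitch class to the six triads it belongs to (objective: alternative).

-- ===== PORT A =====
def pvNoteNames : List String := ["C", "C#", "D", "D#", "E", "F", "F#", "G", "G#", "A", "A#", "B"]

-- shared final step: both Pythons end with 'if not best: return None; return f"{NOTE_NAMES[root]}:{q}"'
def pvFinish (st : Option (Int × String) × Int) : Option String :=
  match st.1 with
  | none => none
  | some (root, q) => some (PySem.List.pyGetD pvNoteNames root "" ++ ":" ++ q)

def pvStepA (pcs : PySem.Set Int) (st : Option (Int × String) × Int) (root : Int) :
    Option (Int × String) × Int :=
  let maj : PySem.Set Int :=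
    PySem.Set.ofList [root, PySem.Int.mod (root + 4) 12, PySem.Int.mod (root + 7) 12]
  let minr : PySem.Set Int :=
    PySem.Set.ofList [root, PySem.Int.mod (root + 3) 12, PySem.Int.mod (root + 7) 12]
  let maj_score := PySem.Set.len (PySem.Set.inter pcs maj)
  let min_score := PySem.Set.len (PySem.Set.inter pcs minr)
  let st1 := if maj_score > st.2 ∧ maj_score ≥ 2 then (some (root, "maj"), maj_score) else st
  if min_score > st1.2 ∧ min_score ≥ 2 then (some (root, "min"), min_score) else st1

def infer_triad (pitch_classes : List Int) : Option String :=
  let pcs : PySem.Set Int := PySem.Set.ofList pitch_classes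
  if pcs = [] then none
  else pvFinish ((PySem.List.pyRange 0 12 1).foldl (pvStepA pcs) (none, 0))

-- ===== PORT B =====
def pvStepB (t : List Int × List Int) (pc : Int) : List Int × List Int :=
  if 0 ≤ pc ∧ pc < 12 then
    let mj := PySem.List.pySetD t.1 pc (PySem.List.pyGetD t.1 pc 0 + 1)
    let mn := PySem.List.pySetD t.2 pc (PySem.List.pyGetD t.2 pc 0 + 1)
    let mj := PySem.List.pySetD mj (PySem.Int.mod (pc - 4) 12)
      (PySem.List.pyGetD mj (PySem.Int.mod (pc - 4) 12) 0 + 1)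
    let mn := PySem.List.pySetD mn (PySem.Int.mod (pc - 3) 12)
      (PySem.List.pyGetD mn (PySem.Int.mod (pc - 3) 12) 0 + 1)
    let mj := PySem.List.pySetD mj (PySem.Int.mod (pc - 7) 12)
      (PySem.List.pyGetD mj (PySem.Int.mod (pc - 7) 12) 0 + 1)
    let mn := PySem.List.pySetD mn (PySem.Int.mod (pc - 7) 12)
      (PySem.List.pyGetD mn (PySem.Int.mod (pc - 7) 12) 0 + 1)
    (mj, mn)
  else t

def pvStepSel (t : List Int × List Int) (st : Option (Int × String) × Int) (root : Int) :
    Option (Int × String) × Int :=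
  let st1 := if PySem.List.pyGetD t.1 root 0 > st.2 ∧ PySem.List.pyGetD t.1 root 0 ≥ 2 then
    (some (root, "maj"), PySem.List.pyGetD t.1 root 0) else st
  if PySem.List.pyGetD t.2 root 0 > st1.2 ∧ PySem.List.pyGetD t.2 root 0 ≥ 2 then
    (some (root, "min"), PySem.List.pyGetD t.2 root 0) else st1

def infer_triad_alt (pitch_classes : List Int) : Option String :=
  let t := (PySem.Set.ofList pitch_classes).foldl pvStepB
    (List.replicate 12 0, List.replicate 12 0)
  pvFinish ((PySem.List.pyRange 0 12 1).foldl (pvStepSel t) (none, 0))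

-- ===== PRECONDITION & SPEC =====
def Spec_infer_triad (pitch_classes : List Int) (out : Option String) : Prop := out = infer_triad_alt pitch_classes
instance (pitch_classes : List Int) (out : Option String) : Decidable (Spec_infer_triad pitch_classes out) := by unfold Spec_infer_triad; infer_instance

-- ===== CLAIM (what is proved, stated in full; the proofs are below) =====
def Claim_equal_infer_triad : Prop := ∀ (pitch_classes : List Int), Dom_infer_triad pitch_classes → Spec_infer_triad pitch_classes (infer_triad pitch_classes)

-- ===== LEMMAS AND PROOFS =====

-- one 'table[i] += 1' seen at slot r
lemma pvIncrGet (xs : List Int) (i r : Int) (h : xs.length = 12)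
    (hi0 : 0 ≤ i) (hi : i < 12) (hr0 : 0 ≤ r) (hr : r < 12) :
    PySem.List.pyGetD (PySem.List.pySetD xs i (PySem.List.pyGetD xs i 0 + 1)) r 0
      = PySem.List.pyGetD xs r 0 + (if r = i then 1 else 0) := by
  rw [PySem.List.pySetD_of_nonneg xs _ hi0,
      PySem.List.pyGetD_eq_getElem _ 0 hr0 (by rw [List.length_set, h]; exact_mod_cast hr),
      PySem.List.pyGetD_eq_getElem xs 0 hr0 (by rw [h]; exact_mod_cast hr),
      PySem.List.pyGetD_eq_getElem xs 0 hi0 (by rw [h]; exact_mod_cast hi)]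
  rw [List.getElem_set]
  by_cases hc : r = i
  · subst hc; simp
  · have hn : i.toNat ≠ r.toNat := by omega
    simp [hn, hc]

lemma pvStepB_len1 (t : List Int × List Int) (x : Int) : (pvStepB t x).1.length = t.1.length := by
  unfold pvStepB; split <;> simp [PySem.List.length_pySetD]

lemma pvStepB_len2 (t : List Int × List Int) (x : Int) : (pvStepB t x).2.length = t.2.length := by
  unfold pvStepB; split <;> simp [PySem.List.length_pySetD]

lemma pvStepBMaj (t : List Int × List Int) (x r : Int) (h1 : t.1.length = 12)
    (hr0 : 0 ≤ r) (hr : r < 12) :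
    PySem.List.pyGetD (pvStepB t x).1 r 0
      = PySem.List.pyGetD t.1 r 0
        + (if x = r ∨ x = (r + 4) % 12 ∨ x = (r + 7) % 12 then 1 else 0) := by
  unfold pvStepB
  by_cases hx : 0 ≤ x ∧ x < 12
  · rw [if_pos hx]
    simp only [PySem.Int.mod_eq_emod_of_pos (by norm_num : (0:Int) < 12)]
    rw [pvIncrGet _ _ _ (by simp [PySem.List.length_pySetD, h1]) (by omega) (by omega) hr0 hr,
        pvIncrGet _ _ _ (by simp [PySem.List.length_pySetD, h1]) (by omega) (by omega) hr0 hr,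
        pvIncrGet _ _ _ h1 hx.1 hx.2 hr0 hr]
    split_ifs <;> omega
  · rw [if_neg hx, if_neg (by omega)]
    omega

lemma pvStepBMin (t : List Int × List Int) (x r : Int) (h2 : t.2.length = 12)
    (hr0 : 0 ≤ r) (hr : r < 12) :
    PySem.List.pyGetD (pvStepB t x).2 r 0
      = PySem.List.pyGetD t.2 r 0
        + (if x = r ∨ x = (r + 3) % 12 ∨ x = (r + 7) % 12 then 1 else 0) := by
  unfold pvStepB
  by_cases hx : 0 ≤ x ∧ x < 12
  · rw [if_pos hx]
    simp only [PySem.Int.mod_eq_emod_of_pos (by norm_num : (0:Int) < 12)]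
    rw [pvIncrGet _ _ _ (by simp [PySem.List.length_pySetD, h2]) (by omega) (by omega) hr0 hr,
        pvIncrGet _ _ _ (by simp [PySem.List.length_pySetD, h2]) (by omega) (by omega) hr0 hr,
        pvIncrGet _ _ _ h2 hx.1 hx.2 hr0 hr]
    split_ifs <;> omega
  · rw [if_neg hx, if_neg (by omega)]
    omega

lemma pvBuildMaj (l : List Int) (t : List Int × List Int) (h1 : t.1.length = 12) (r : Int)
    (hr0 : 0 ≤ r) (hr : r < 12) :
    PySem.List.pyGetD (l.foldl pvStepB t).1 r 0
      = PySem.List.pyGetD t.1 r 0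
        + (l.countP (fun x => decide (x = r ∨ x = (r + 4) % 12 ∨ x = (r + 7) % 12)) : Int) := by
  induction l generalizing t with
  | nil => simp
  | cons x xs ih =>
    rw [List.foldl_cons, ih _ (by rw [pvStepB_len1, h1]), List.countP_cons,
        pvStepBMaj t x r h1 hr0 hr]
    simp only [decide_eq_true_eq]
    push_cast
    ring

lemma pvBuildMin (l : List Int) (t : List Int × List Int) (h2 : t.2.length = 12) (r : Int)
    (hr0 : 0 ≤ r) (hr : r < 12) :
    PySem.List.pyGetD (l.foldl pvStepB t).2 r 0
      = PySem.List.pyGetD t.2 r 0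
        + (l.countP (fun x => decide (x = r ∨ x = (r + 3) % 12 ∨ x = (r + 7) % 12)) : Int) := by
  induction l generalizing t with
  | nil => simp
  | cons x xs ih =>
    rw [List.foldl_cons, ih _ (by rw [pvStepB_len2, h2]), List.countP_cons,
        pvStepBMin t x r h2 hr0 hr]
    simp only [decide_eq_true_eq]
    push_cast
    ring

lemma pvScoreA (pcs : List Int) (a b c : Int) :
    PySem.Set.len (PySem.Set.inter pcs (PySem.Set.ofList [a, b, c]))
      = (pcs.countP (fun x => decide (x = a ∨ x = b ∨ x = c)) : Int) := by
  unfold PySem.Set.len PySem.Set.inter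
  congr 1
  rw [← List.countP_eq_length_filter]
  apply List.countP_congr
  intro x _
  rw [Bool.eq_iff_iff]
  simp [PySem.Set.mem_ofList]

lemma pvReplGet (r : Int) (hr0 : 0 ≤ r) (hr : r < 12) :
    PySem.List.pyGetD (List.replicate 12 (0:Int)) r 0 = 0 := by
  rw [PySem.List.pyGetD_eq_getElem _ 0 hr0 (by simp only [List.length_replicate]; omega),
      List.getElem_replicate]

set_option maxRecDepth 8192 in
set_option maxHeartbeats 1000000 in
lemma pvMain (l : List Int) : infer_triad l = infer_triad_alt l := by
  cases l with
  | nil => decide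
  | cons y ys =>
    simp only [infer_triad, infer_triad_alt]
    have hne : PySem.Set.ofList (y :: ys) ≠ [] := by
      intro h
      have hy : y ∈ PySem.Set.ofList (y :: ys) := (PySem.Set.mem_ofList _ y).mpr (by simp)
      rw [h] at hy; simp at hy
    rw [if_neg hne]
    refine congrArg pvFinish ?_
    apply PySem.List.foldl_congr_mem
    intro acc root hmem
    obtain ⟨hr0, hr⟩ := (PySem.List.mem_pyRange_one).mp hmem
    unfold pvStepA pvStepSel
    have hmaj :
        PySem.Set.len (PySem.Set.inter (PySem.Set.ofList (y :: ys))
          (PySem.Set.ofList [root, PySem.Int.mod (root + 4) 12, PySem.Int.mod (root + 7) 12]))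
        = PySem.List.pyGetD ((PySem.Set.ofList (y :: ys)).foldl pvStepB
            (List.replicate 12 0, List.replicate 12 0)).1 root 0 := by
      rw [pvScoreA, pvBuildMaj _ _ (by simp) root hr0 hr, pvReplGet root hr0 hr,
          PySem.Int.mod_eq_emod_of_pos (by norm_num : (0:Int) < 12),
          PySem.Int.mod_eq_emod_of_pos (by norm_num : (0:Int) < 12)]
      omega
    have hmin :
        PySem.Set.len (PySem.Set.inter (PySem.Set.ofList (y :: ys))
          (PySem.Set.ofList [root, PySem.Int.mod (root + 3) 12, PySem.Int.mod (root + 7) 12]))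
        = PySem.List.pyGetD ((PySem.Set.ofList (y :: ys)).foldl pvStepB
            (List.replicate 12 0, List.replicate 12 0)).2 root 0 := by
      rw [pvScoreA, pvBuildMin _ _ (by simp) root hr0 hr, pvReplGet root hr0 hr,
          PySem.Int.mod_eq_emod_of_pos (by norm_num : (0:Int) < 12),
          PySem.Int.mod_eq_emod_of_pos (by norm_num : (0:Int) < 12)]
      omega
    simp only [hmaj, hmin]

-- ===== VERDICT (by name: the statement is the Claim_ definition above) =====
theorem infer_triad_spec : Claim_equal_infer_triad := by
  intro l _
  unfold Spec_infer_triad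
  exact pvMain l
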